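-- pv_equiv track=rewrite | github.com/Shashwatsngh/OS_Project | fs.py | linked
-- ===== SOURCE A (Python) =====
-- def linked(disk_size, files):
--     disk = [None]*disk_size
--     allocation = {}
--     free = [i for i in range(disk_size)]
--     for fid, size in enumerate(files):
--         if len(free) < size: break
--         chain = []
--         for _ in range(size):
--             block = free.pop(0)
--             disk[block] = fid
--             chain.append(block)
--         allocation[fid] = ('linked', chain)
--     return disk, allocation
-- ===== SOURCE B (Python) =====
-- def linked(disk_size, files):
--     disk = [None] * disk_size
--     n = len(disk)
--     allocation = {}
--     pos = 0
--     for fid, size in enumerate(files):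
--         if n - pos < size:
--             break
--         chain = list(range(pos, pos + size))
--         for b in chain:
--             disk[b] = fid
--         allocation[fid] = ('linked', chain)
--         pos += len(chain)
--     return disk, allocation
-- ===== Notes on version B (the rewrite author's own statement) =====
-- stated objective: alternative
-- what changed: Replaces the FIFO free-block list and the per-block pop(0) inner loop with a single integer cursor: each file's chain is the closed-form list(range(pos, pos+size)), written in one pass, and the cursor advances by the chain length.
import Mathlib
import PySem

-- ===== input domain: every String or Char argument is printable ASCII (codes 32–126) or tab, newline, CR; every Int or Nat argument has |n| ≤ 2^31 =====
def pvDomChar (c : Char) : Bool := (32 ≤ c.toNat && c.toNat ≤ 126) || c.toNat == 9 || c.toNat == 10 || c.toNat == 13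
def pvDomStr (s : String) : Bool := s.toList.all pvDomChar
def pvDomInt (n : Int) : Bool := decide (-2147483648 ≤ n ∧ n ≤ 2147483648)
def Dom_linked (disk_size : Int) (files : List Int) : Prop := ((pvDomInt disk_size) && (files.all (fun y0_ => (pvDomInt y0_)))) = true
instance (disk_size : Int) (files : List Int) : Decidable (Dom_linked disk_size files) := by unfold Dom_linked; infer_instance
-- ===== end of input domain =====

-- B replaces A's FIFO free-block queue (pop(0) per block) with an integer cursor and
-- closed-form range chains; same return value, proved equal on all inputs (objective: alternative).

-- ===== PORT A =====
-- inner loop: for _ in range(size): block = free.pop(0); disk[block] = fid; chain.append(block)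
-- ([] branch is unreachable in linked: guarded by len(free) >= size; Python would raise IndexError)
def linkedInner (fid : Int) : Nat → List (Option Int) → List Int → List Int →
    List (Option Int) × List Int × List Int
  | 0, disk, free, chain => (disk, free, chain)
  | k+1, disk, free, chain =>
    match free with
    | [] => (disk, free, chain)
    | b :: rest => linkedInner fid k (PySem.List.pySetD disk b (some fid)) rest (chain ++ [b])

def linkedLoop (fid : Int) (files : List Int) (disk : List (Option Int))
    (alloc : PySem.Dict Int (String × List Int)) (free : List Int) :
    List (Option Int) × (List (Int × String × List Int)) :=
  match files with
  | [] => (disk, alloc.items)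
  | size :: rest =>
    if (free.length : Int) < size then (disk, alloc.items)
    else
      let r := linkedInner fid size.toNat disk free []
      linkedLoop (fid + 1) rest r.1 (alloc.insert fid ("linked", r.2.2)) r.2.1

def linked (disk_size : Int) (files : List Int) :
    List (Option Int) × (List (Int × String × List Int)) :=
  let disk : List (Option Int) := List.replicate disk_size.toNat none
  let free := PySem.List.pyRange 0 disk_size 1
  linkedLoop 0 files disk PySem.Dict.empty free

-- ===== PORT B =====
def linkedAltLoop (fid n pos : Int) (files : List Int) (disk : List (Option Int))
    (alloc : PySem.Dict Int (String × List Int)) :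
    List (Option Int) × (List (Int × String × List Int)) :=
  match files with
  | [] => (disk, alloc.items)
  | size :: rest =>
    if n - pos < size then (disk, alloc.items)
    else
      let chain := PySem.List.pyRange pos (pos + size) 1
      let disk' := chain.foldl (fun d b => PySem.List.pySetD d b (some fid)) disk
      linkedAltLoop (fid + 1) n (pos + (chain.length : Int)) rest disk'
        (alloc.insert fid ("linked", chain))

def linked_alt (disk_size : Int) (files : List Int) :
    List (Option Int) × (List (Int × String × List Int)) :=
  let disk : List (Option Int) := List.replicate disk_size.toNat none
  linkedAltLoop 0 (disk.length : Int) 0 files disk PySem.Dict.empty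

-- ===== PRECONDITION & SPEC =====
def Spec_linked (disk_size : Int) (files : List Int) (out : List (Option Int) × (List (Int × String × List Int))) : Prop := out = linked_alt disk_size files
instance (disk_size : Int) (files : List Int) (out : List (Option Int) × (List (Int × String × List Int))) : Decidable (Spec_linked disk_size files out) := by unfold Spec_linked; infer_instance

-- ===== CLAIM (what is proved, stated in full; the proofs are below) =====
def Claim_equal_linked : Prop := ∀ (disk_size : Int) (files : List Int), Dom_linked disk_size files → Spec_linked disk_size files (linked disk_size files)

-- ===== LEMMAS AND PROOFS =====

-- A's inner loop on a consecutive free list = a closed-form range chain.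
lemma linkedInner_spec (fid : Int) (k : Nat) :
    ∀ (disk : List (Option Int)) (pos b : Int) (chain : List Int),
      (k : Int) ≤ b - pos →
      linkedInner fid k disk (PySem.List.pyRange pos b 1) chain =
        ((PySem.List.pyRange pos (pos + k) 1).foldl
            (fun d x => PySem.List.pySetD d x (some fid)) disk,
         PySem.List.pyRange (pos + k) b 1,
         chain ++ PySem.List.pyRange pos (pos + k) 1) := by
  induction k with
  | zero =>
    intro disk pos b chain _
    simp [linkedInner, PySem.List.pyRange_one_eq_nil (le_refl pos)]
  | succ k ih =>
    intro disk pos b chain hk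
    have hpb : pos < b := by omega
    push_cast
    have hcons : PySem.List.pyRange pos (pos + ((k : Int) + 1)) 1
        = pos :: PySem.List.pyRange (pos + 1) (pos + ((k : Int) + 1)) 1 :=
      PySem.List.pyRange_one_cons (by omega)
    rw [PySem.List.pyRange_one_cons hpb]
    simp only [linkedInner]
    rw [ih (PySem.List.pySetD disk pos (some fid)) (pos + 1) b (chain ++ [pos]) (by omega)]
    have e1 : pos + 1 + (k : Int) = pos + ((k : Int) + 1) := by ring
    rw [e1, hcons]
    simp

-- range to a possibly-negative offset = range to the clamped offset
lemma pyRange_add_toNat (a s : Int) :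
    PySem.List.pyRange a (a + s) 1 = PySem.List.pyRange a (a + (s.toNat : Int)) 1 := by
  by_cases h : 0 ≤ s
  · rw [Int.toNat_of_nonneg h]
  · rw [PySem.List.pyRange_one_eq_nil (by omega), PySem.List.pyRange_one_eq_nil (by omega)]

-- Main loop correspondence: A's loop with free = range(pos, n) equals B's loop with cursor pos.
lemma loop_eq (files : List Int) :
    ∀ (fid pos n : Int) (disk : List (Option Int)) (alloc : PySem.Dict Int (String × List Int)),
      0 ≤ pos → pos ≤ n →
      linkedLoop fid files disk alloc (PySem.List.pyRange pos n 1) =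
        linkedAltLoop fid n pos files disk alloc := by
  induction files with
  | nil => intro fid pos n disk alloc _ _; rfl
  | cons size rest ih =>
    intro fid pos n disk alloc hpos hpn
    simp only [linkedLoop, linkedAltLoop]
    have hlen : ((PySem.List.pyRange pos n 1).length : Int) = n - pos := by
      rw [PySem.List.length_pyRange_one]; omega
    rw [hlen]
    by_cases hbr : n - pos < size
    · simp [hbr]
    · simp only [hbr, if_false]
      have hk : ((size.toNat : Nat) : Int) ≤ n - pos := by omega
      rw [linkedInner_spec fid size.toNat disk pos n [] hk]
      have hchain : PySem.List.pyRange pos (pos + size) 1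
          = PySem.List.pyRange pos (pos + (size.toNat : Int)) 1 := pyRange_add_toNat pos size
      have hclen : ((PySem.List.pyRange pos (pos + (size.toNat : Int)) 1).length : Int)
          = (size.toNat : Int) := by
        rw [PySem.List.length_pyRange_one]; omega
      simp only [hchain, hclen, List.nil_append]
      exact ih (fid + 1) (pos + (size.toNat : Int)) n _ _ (by omega) (by omega)

-- ===== VERDICT (by name: the statement is the Claim_ definition above) =====
theorem linked_spec : Claim_equal_linked := by
  intro disk_size files _
  unfold Spec_linked linked linked_alt
  have h : PySem.List.pyRange 0 disk_size 1
      = PySem.List.pyRange 0 ((List.replicate disk_size.toNat (none : Option Int)).length : Int) 1 := by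
    simp only [List.length_replicate]
    by_cases h0 : 0 ≤ disk_size
    · rw [Int.toNat_of_nonneg h0]
    · rw [PySem.List.pyRange_one_eq_nil (by omega), PySem.List.pyRange_one_eq_nil (by omega)]
  simp only [h]
  exact loop_eq files 0 0 _ _ _ (le_refl 0) (by omega)
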